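-- pv_equiv track=rewrite | github.com/CHOIisaac/Algorithm | 프로그래머스/1/138477. 명예의 전당 （1）/명예의 전당 （1）.py | solution
-- ===== SOURCE A (Python) =====
-- def solution(k, score):
--     answer = []
--     a = []
--     for i in score:
--         a.append(i)
--         a.sort(reverse=True)
--
--         if len(a) > k:
--             a.pop()
--
--         answer.append(a[-1])
--     return answer
-- ===== SOURCE B (Python) =====
-- def solution(k, score):
--     answer = []
--     pool = []  # unordered buffer holding the current top-k scores
--     for x in score:
--         if len(pool) < k:
--             pool.append(x)
--         else:
--             m = 0
--             for j in range(1, len(pool)):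
--                 if pool[j] < pool[m]:
--                     m = j
--             if x > pool[m]:
--                 pool[m] = x
--         best = pool[0]
--         for v in pool:
--             if v < best:
--                 best = v
--         answer.append(best)
--     return answer
-- ===== Notes on version B (the rewrite author's own statement) =====
-- stated objective: alternative
-- what changed: B keeps no order at all: instead of A's per-step re-sort of the retained list (append, sort descending, pop the tail, read the tail), B holds the current top-k in an unordered buffer, finds the buffer's minimum by a linear scan, overwrites that slot in place when the new score beats it, and emits the scanned minimum - no sorting anywhere.
import Mathlib
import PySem

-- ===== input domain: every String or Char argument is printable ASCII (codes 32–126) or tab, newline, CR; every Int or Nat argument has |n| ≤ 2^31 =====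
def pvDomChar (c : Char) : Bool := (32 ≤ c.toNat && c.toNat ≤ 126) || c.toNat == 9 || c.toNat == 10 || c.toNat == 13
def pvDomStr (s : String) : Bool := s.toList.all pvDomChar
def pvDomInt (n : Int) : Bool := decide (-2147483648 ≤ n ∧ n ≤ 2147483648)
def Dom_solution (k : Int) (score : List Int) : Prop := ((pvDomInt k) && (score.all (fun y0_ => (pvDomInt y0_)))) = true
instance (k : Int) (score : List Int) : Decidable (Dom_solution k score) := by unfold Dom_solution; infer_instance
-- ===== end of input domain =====

-- B keeps no order at all: instead of A's per-step descending re-sort (append, sort, pop the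
-- tail, read the tail), B holds the current top-k in an unordered buffer, finds the buffer's
-- minimum slot by a linear scan, overwrites that slot when the new score beats it, and emits
-- the scanned minimum (objective: alternative — no sorting anywhere; not claimed faster).

-- ===== PORT A =====
-- One step of A's loop body; the Option is none exactly where the Python raises (a[-1] on an
-- empty list, which happens iff k ≤ 0). a.pop() is on 'sorted(a ++ [i])', never empty, so the
-- '.getD a1' fallback of pop? is never taken.
def solutionStepA (k : Int) (st : Option (List Int × List Int)) (i : Int) :
    Option (List Int × List Int) :=
  match st with
  | none => none
  | some (answer, a) =>
    let a1 := PySem.List.sorted (a ++ [i]) (fun y => y) true    -- a.append(i); a.sort(reverse=True)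
    let a2 := if PySem.List.len a1 > k
              then ((PySem.List.pop? a1).map Prod.snd).getD a1  -- a.pop()
              else a1
    match PySem.List.pyGet? a2 (-1) with                        -- a[-1]
    | none => none
    | some v => some (answer ++ [v], a2)

def solution (k : Int) (score : List Int) : List Int :=
  ((score.foldl (solutionStepA k) (some ([], []))).map Prod.fst).getD []

-- ===== PORT B =====
-- One step of B's loop body; none exactly where the Python raises (pool[m] / pool[0] on the
-- empty pool, which happens iff k ≤ 0).  In the argmin loop both indices m and j are always in
-- range (the range is 1..len(pool)-1 and m starts at 0), so pyGetD's default 0 is never read;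
-- likewise m is nonnegative and in range at pool[m] = x, so pySetD is exact there.
def solutionStepB (k : Int) (st : Option (List Int × List Int)) (x : Int) :
    Option (List Int × List Int) :=
  match st with
  | none => none
  | some (answer, pool) =>
    let poolNew : Option (List Int) :=
      if PySem.List.len pool < k then
        some (pool ++ [x])                                       -- pool.append(x)
      else
        -- m = 0; for j in range(1, len(pool)): if pool[j] < pool[m]: m = j
        let m := (PySem.List.pyRange 1 (PySem.List.len pool) 1).foldl
          (fun m j => if PySem.List.pyGetD pool j 0 < PySem.List.pyGetD pool m 0 then j else m) 0
        match PySem.List.pyGet? pool m with                      -- pool[m]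
        | none => none
        | some pm => some (if x > pm then PySem.List.pySetD pool m x else pool)
    match poolNew with
    | none => none
    | some p =>
      match PySem.List.pyGet? p 0 with                           -- best = pool[0]
      | none => none
      | some b0 =>
        let best := p.foldl (fun b v => if v < b then v else b) b0  -- for v in pool: …
        some (answer ++ [best], p)

def solution_alt (k : Int) (score : List Int) : List Int :=
  ((score.foldl (solutionStepB k) (some ([], []))).map Prod.fst).getD []

-- ===== PRECONDITION & SPEC =====
-- A raises IndexError (a[-1] on the emptied list) whenever k ≤ 0 and score is nonempty; those
-- inputs are excluded (B's Python raises there too).  Everywhere A returns, Pre_ holds.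
def Pre_solution (k : Int) (score : List Int) : Prop := 1 ≤ k ∨ score = []
instance (k : Int) (score : List Int) : Decidable (Pre_solution k score) := by
  unfold Pre_solution; infer_instance

def pvWitness_solution : Int × List Int := (3, [10, 100, 20, 150, 1, 100])

def Spec_solution (k : Int) (score : List Int) (out : List Int) : Prop := out = solution_alt k score
instance (k : Int) (score : List Int) (out : List Int) : Decidable (Spec_solution k score out) := by
  unfold Spec_solution; infer_instance

-- ===== CLAIM (what is proved, stated in full; the proofs are below) =====
def Claim_equal_solution : Prop := ∀ (k : Int) (score : List Int), Dom_solution k score → Pre_solution k score → Spec_solution k score (solution k score)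

-- ===== LEMMAS AND PROOFS =====

-- The running-min scan: its result is a member of b :: l and a lower bound of b :: l.
lemma scan_min (l : List Int) : ∀ b : Int,
    (l.foldl (fun b v => if v < b then v else b) b ∈ b :: l) ∧
    l.foldl (fun b v => if v < b then v else b) b ≤ b ∧
    ∀ v ∈ l, l.foldl (fun b v => if v < b then v else b) b ≤ v := by
  induction l with
  | nil => intro b; simp
  | cons v t ih =>
    intro b
    simp only [List.foldl_cons]
    obtain ⟨hmem, hle, hall⟩ := ih (if v < b then v else b)
    have hb' : (if v < b then v else b) ≤ b := by split_ifs with h; exact le_of_lt h; exact le_refl b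
    have hv' : (if v < b then v else b) ≤ v := by split_ifs with h; exact le_refl v; exact le_of_not_gt h
    refine ⟨?_, le_trans hle hb', ?_⟩
    · rcases List.mem_cons.1 hmem with h | h
      · rw [h]; split_ifs with hc
        · exact List.mem_cons_of_mem _ (List.mem_cons_self)
        · exact List.mem_cons_self
      · exact List.mem_cons_of_mem _ (List.mem_cons_of_mem _ h)
    · intro u hu
      rcases List.mem_cons.1 hu with h | h
      · rw [h]; exact le_trans hle hv'
      · exact hall u h

-- The argmin fold over a list of in-range indices: the result is in range, no worse than the
-- start index, and no worse than any scanned index.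
lemma argmin_spec (pool : List Int) : ∀ (js : List Int) (m0 : Int), 0 ≤ m0 → m0 < (pool.length : Int) →
    (∀ j ∈ js, 0 ≤ j ∧ j < (pool.length : Int)) →
    (0 ≤ js.foldl (fun m j => if PySem.List.pyGetD pool j 0 < PySem.List.pyGetD pool m 0 then j else m) m0 ∧
     js.foldl (fun m j => if PySem.List.pyGetD pool j 0 < PySem.List.pyGetD pool m 0 then j else m) m0 < (pool.length : Int)) ∧
    PySem.List.pyGetD pool (js.foldl (fun m j => if PySem.List.pyGetD pool j 0 < PySem.List.pyGetD pool m 0 then j else m) m0) 0 ≤ PySem.List.pyGetD pool m0 0 ∧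
    ∀ j ∈ js, PySem.List.pyGetD pool (js.foldl (fun m j => if PySem.List.pyGetD pool j 0 < PySem.List.pyGetD pool m 0 then j else m) m0) 0 ≤ PySem.List.pyGetD pool j 0 := by
  intro js
  induction js with
  | nil => intro m0 h0 h1 _; exact ⟨⟨h0, h1⟩, le_refl _, by simp⟩
  | cons j t ih =>
    intro m0 h0 h1 hjs
    have hj := hjs j List.mem_cons_self
    simp only [List.foldl_cons]
    by_cases hc : PySem.List.pyGetD pool j 0 < PySem.List.pyGetD pool m0 0
    · simp only [hc, if_true]
      obtain ⟨hr, hle, hall⟩ := ih j hj.1 hj.2 (fun u hu => hjs u (List.mem_cons_of_mem _ hu))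
      exact ⟨hr, le_trans hle (le_of_lt hc), fun u hu => by
        rcases List.mem_cons.1 hu with h | h
        · rw [h]; exact hle
        · exact hall u h⟩
    · simp only [hc, if_false]
      obtain ⟨hr, hle, hall⟩ := ih m0 h0 h1 (fun u hu => hjs u (List.mem_cons_of_mem _ hu))
      exact ⟨hr, hle, fun u hu => by
        rcases List.mem_cons.1 hu with h | h
        · rw [h]; exact le_trans hle (le_of_not_gt hc)
        · exact hall u h⟩

-- Two minima of permutation-equal lists are equal.
lemma min_unique {l1 l2 : List Int} (hp : l1.Perm l2) {v1 v2 : Int}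
    (h1m : ∀ y ∈ l1, v1 ≤ y) (h2 : v2 ∈ l2) (h1 : v1 ∈ l1) (h2m : ∀ y ∈ l2, v2 ≤ y) : v1 = v2 :=
  le_antisymm (h1m v2 (hp.mem_iff.mpr h2)) (h2m v1 (hp.mem_iff.mp h1))

-- The last element of a descending (Pairwise ≥) list bounds every element from below.
lemma last_min {ys : List Int} {y : Int}
    (h : (ys ++ [y]).Pairwise (fun p q => q ≤ p)) : ∀ z ∈ ys ++ [y], y ≤ z := by
  intro z hz
  rcases List.mem_append.1 hz with h' | h'
  · exact (List.pairwise_append.1 h).2.2 z h' y (List.mem_singleton_self y)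
  · rw [List.mem_singleton.1 h']

-- Overwriting slot i is, as a multiset, 'drop the old value, add the new one'.
lemma set_perm (l : List Int) (i : Nat) (h : i < l.length) (x : Int) :
    (l.set i x).Perm (x :: l.eraseIdx i) ∧ l.Perm (l[i] :: l.eraseIdx i) := by
  have hd : l.drop i = l[i] :: l.drop (i + 1) := List.drop_eq_getElem_cons h
  constructor
  · rw [List.set_eq_take_append_cons_drop, List.eraseIdx_eq_take_drop_succ, if_pos h]
    exact List.perm_middle
  · conv_lhs => rw [← List.take_append_drop i l, hd]
    rw [List.eraseIdx_eq_take_drop_succ]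
    exact List.perm_middle

-- One loop step: from permutation-related states the two steps emit the same answer element
-- and reach permutation-related states again.
lemma step_rel (k : Int) (hk : 1 ≤ k) (ans a pool : List Int)
    (hperm : pool.Perm a) (hlen : (a.length : Int) ≤ k) (x : Int) :
    ∃ v a2 p2, solutionStepA k (some (ans, a)) x = some (ans ++ [v], a2) ∧
      solutionStepB k (some (ans, pool)) x = some (ans ++ [v], p2) ∧
      p2.Perm a2 ∧ ((a2.length : Int) ≤ k) := by
  set s := PySem.List.sorted (a ++ [x]) (fun y => y) true with hs
  have hsp : s.Perm (a ++ [x]) := PySem.List.sorted_perm (a ++ [x]) (fun y => y) true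
  have hspair : s.Pairwise (fun p q => q ≤ p) :=
    PySem.List.sorted_pairwise_rev (a ++ [x]) (fun y => y)
  have hslen : s.length = a.length + 1 := by rw [hsp.length_eq]; simp
  have hsne : s ≠ [] := by intro h; rw [h] at hslen; simp at hslen
  obtain ⟨ys, y, hys'⟩ := (List.eq_nil_or_concat s).resolve_left hsne
  have hys : s = ys ++ [y] := by rw [hys', List.concat_eq_append]
  have hymin : ∀ z ∈ s, y ≤ z := by rw [hys]; exact last_min (hys ▸ hspair)
  have hlp : pool.length = a.length := hperm.length_eq
  by_cases hlt : PySem.List.len pool < k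
  · -- pool not yet full: A sorts and keeps everything, B appends
    have hlt' : (a.length : Int) < k := by
      simpa [PySem.List.len_eq, hlp] using hlt
    have hngt : ¬ PySem.List.len s > k := by
      simp only [PySem.List.len_eq, hslen]; push_cast; omega
    have hA : solutionStepA k (some (ans, a)) x = some (ans ++ [y], s) := by
      simp only [solutionStepA, ← hs, hngt, if_false]
      rw [hys, PySem.List.pyGet?_neg_one_append_singleton]
    have hpne : pool ++ [x] ≠ [] := by simp
    obtain ⟨c, cs, hc⟩ := List.exists_cons_of_ne_nil hpne
    have hpp : (pool ++ [x]).Perm s := (hperm.append_right [x]).trans hsp.symm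
    obtain ⟨hbmem, _, hball⟩ := scan_min (c :: cs) c
    have hbmem' : (c :: cs).foldl (fun b v => if v < b then v else b) c ∈ c :: cs := by
      rcases List.mem_cons.1 hbmem with h | h
      · rw [h]; exact List.mem_cons_self
      · exact h
    have hbest : (c :: cs).foldl (fun b v => if v < b then v else b) c = y := by
      refine min_unique (hc ▸ hpp) hball ?_ hbmem' hymin
      rw [hys]; exact List.mem_append_right _ (List.mem_singleton_self y)
    have hB : solutionStepB k (some (ans, pool)) x = some (ans ++ [y], pool ++ [x]) := by
      simp only [solutionStepB, hlt, if_true]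
      rw [hc, PySem.List.pyGet?_zero_cons]
      simp only [hbest]
    refine ⟨y, s, pool ++ [x], hA, by rw [hB, hc], hc ▸ hc ▸ hpp, ?_⟩
    rw [hslen]; push_cast; omega
  · -- pool full (length = k ≥ 1): A sorts and pops the tail, B conditionally overwrites argmin
    have hka : (a.length : Int) = k := by
      have : ¬ ((pool.length : Int) < k) := by simpa [PySem.List.len_eq] using hlt
      omega
    have hpoollen : 1 ≤ pool.length := by omega
    have hgt : PySem.List.len s > k := by
      simp only [PySem.List.len_eq, hslen]; push_cast; omega
    have hyslen : ys.length = a.length := by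
      have := hslen; rw [hys] at this; simp at this; omega
    have hysne : ys ≠ [] := by
      intro h; rw [h] at hyslen; simp at hyslen; omega
    obtain ⟨zs, w, hzs'⟩ := (List.eq_nil_or_concat ys).resolve_left hysne
    have hzs : ys = zs ++ [w] := by rw [hzs', List.concat_eq_append]
    have hyspair : ys.Pairwise (fun p q => q ≤ p) :=
      (List.pairwise_append.1 (hys ▸ hspair)).1
    have hwmin : ∀ z ∈ ys, w ≤ z := by rw [hzs]; exact last_min (hzs ▸ hyspair)
    have hwmem : w ∈ ys := by
      rw [hzs]; exact List.mem_append_right _ (List.mem_singleton_self w)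
    have hA : solutionStepA k (some (ans, a)) x = some (ans ++ [w], ys) := by
      simp only [solutionStepA, ← hs, hgt, if_true]
      rw [hys, PySem.List.pop?_last]
      simp only [Option.map_some, Option.getD_some]
      rw [hzs, PySem.List.pyGet?_neg_one_append_singleton]
    -- the argmin index M and its value vm
    set M := (PySem.List.pyRange 1 (PySem.List.len pool) 1).foldl
      (fun m j => if PySem.List.pyGetD pool j 0 < PySem.List.pyGetD pool m 0 then j else m) 0
      with hM
    obtain ⟨⟨hm0, hmlt⟩, hmle0, hmall⟩ := argmin_spec pool
      (PySem.List.pyRange 1 (PySem.List.len pool) 1) 0 (le_refl 0) (by exact_mod_cast hpoollen)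
      (by
        intro j hj
        rw [PySem.List.len_eq] at hj
        have := (PySem.List.mem_pyRange_one).1 hj
        exact ⟨by omega, this.2⟩)
    rw [← hM] at hm0 hmle0
    rw [← hM] at hmlt
    rw [← hM] at hmall
    have hmns : M.toNat < pool.length := by omega
    have hvm : PySem.List.pyGetD pool M 0 = pool[M.toNat] :=
      PySem.List.pyGetD_eq_getElem pool 0 hm0 hmlt
    set vm := PySem.List.pyGetD pool M 0 with hvmdef
    have hvmmem : vm ∈ pool := by rw [hvm]; exact List.getElem_mem hmns
    have hminpool : ∀ z ∈ pool, vm ≤ z := by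
      intro z hz
      obtain ⟨i, hi, rfl⟩ := List.mem_iff_getElem.1 hz
      by_cases hi0 : i = 0
      · subst hi0
        have h0 : PySem.List.pyGetD pool 0 0 = pool[0] :=
          PySem.List.pyGetD_eq_getElem pool 0 (le_refl 0) (by exact_mod_cast hpoollen)
        rw [← h0]; exact hmle0
      · have hmem : (i : Int) ∈ PySem.List.pyRange 1 (PySem.List.len pool) 1 := by
          rw [PySem.List.len_eq]
          exact (PySem.List.mem_pyRange_one).2 ⟨by omega, by exact_mod_cast hi⟩
        have hgi : PySem.List.pyGetD pool (i : Int) 0 = pool[i] := by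
          rw [PySem.List.pyGetD_eq_getElem pool 0 (by omega) (by exact_mod_cast hi)]
          simp
        calc vm ≤ PySem.List.pyGetD pool (i : Int) 0 := hmall _ hmem
          _ = pool[i] := hgi
    have hvminS : vm ∈ s := hsp.mem_iff.2 (List.mem_append_left _ (hperm.mem_iff.1 hvmmem))
    have hpg : PySem.List.pyGet? pool M = some vm := by
      rw [PySem.List.pyGet?_eq_some_getElem pool hm0 hmlt, hvm]
    have hyvm_le : y ≤ vm := hymin vm hvminS
    have hnlt : ¬ PySem.List.len pool < k := hlt
    by_cases hx : x > vm
    · -- new score beats the current minimum: it replaces it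
      have hyins : y ∈ a ++ [x] := hsp.mem_iff.1 (by rw [hys]; exact List.mem_append_right _ (List.mem_singleton_self y))
      have hya : y ∈ a := by
        rcases List.mem_append.1 hyins with h | h
        · exact h
        · exfalso; rw [List.mem_singleton.1 h] at hyvm_le; omega
      have hyvm : y = vm :=
        le_antisymm hyvm_le (hminpool y (hperm.mem_iff.2 hya))
      obtain ⟨hsetp, hpoolp⟩ := set_perm pool M.toNat hmns x
      have hpoolp' : pool.Perm (vm :: pool.eraseIdx M.toNat) := by rwa [← hvm] at hpoolp
      have hchain : (y :: ys).Perm (vm :: x :: pool.eraseIdx M.toNat) := by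
        have h1 : (y :: ys).Perm s := by rw [hys]; exact (List.perm_append_singleton y ys).symm
        have h2 : s.Perm (pool ++ [x]) := hsp.trans (hperm.symm.append_right [x])
        have h3 : (pool ++ [x]).Perm ((vm :: pool.eraseIdx M.toNat) ++ [x]) :=
          hpoolp'.append_right [x]
        have h4 : ((vm :: pool.eraseIdx M.toNat) ++ [x]).Perm (vm :: x :: pool.eraseIdx M.toNat) := by
          simp only [List.cons_append]
          exact List.Perm.cons vm (List.perm_append_singleton x _)
        exact ((h1.trans h2).trans h3).trans h4
      have hysperm : ys.Perm (x :: pool.eraseIdx M.toNat) := by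
        have := hchain
        rw [hyvm] at this
        exact this.cons_inv
      have hp2perm : (PySem.List.pySetD pool M x).Perm ys := by
        rw [PySem.List.pySetD_of_nonneg pool x hm0]
        exact hsetp.trans hysperm.symm
      have hp2len : (PySem.List.pySetD pool M x).length = pool.length := by
        rw [PySem.List.pySetD_of_nonneg pool x hm0]; simp
      have hp2ne : PySem.List.pySetD pool M x ≠ [] := by
        intro h; rw [h] at hp2len; simp at hp2len; omega
      obtain ⟨c, cs, hc⟩ := List.exists_cons_of_ne_nil hp2ne
      obtain ⟨hbmem, _, hball⟩ := scan_min (c :: cs) c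
      have hbmem' : (c :: cs).foldl (fun b v => if v < b then v else b) c ∈ c :: cs := by
        rcases List.mem_cons.1 hbmem with h | h
        · rw [h]; exact List.mem_cons_self
        · exact h
      have hbest : (c :: cs).foldl (fun b v => if v < b then v else b) c = w := by
        exact min_unique (hc ▸ hp2perm) hball hwmem hbmem' hwmin
      have hB : solutionStepB k (some (ans, pool)) x
          = some (ans ++ [w], PySem.List.pySetD pool M x) := by
        simp only [solutionStepB, hnlt, if_false, ← hM, hpg, hx, if_true]
        rw [hc, PySem.List.pyGet?_zero_cons]
        simp only [hbest]
      refine ⟨w, ys, PySem.List.pySetD pool M x, hA, hB, hp2perm, ?_⟩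
      push_cast [hyslen]; omega
    · -- new score does not beat the minimum: B's pool is unchanged, A pops the new score back out
      have hyx : y = x := by
        have hyins : y ∈ a ++ [x] := hsp.mem_iff.1 (by rw [hys]; exact List.mem_append_right _ (List.mem_singleton_self y))
        have hxins : x ∈ s := hsp.mem_iff.2 (List.mem_append_right _ (List.mem_singleton_self x))
        refine le_antisymm (hymin x hxins) ?_
        rcases List.mem_append.1 hyins with h | h
        · have := hminpool y (hperm.mem_iff.2 h); omega
        · rw [List.mem_singleton.1 h]
      have hysperm : ys.Perm pool := by
        have h1 : (y :: ys).Perm s := by rw [hys]; exact (List.perm_append_singleton y ys).symm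
        have h2 : s.Perm (pool ++ [x]) := hsp.trans (hperm.symm.append_right [x])
        have h3 : (pool ++ [x]).Perm (x :: pool) := List.perm_append_singleton x pool
        have := (h1.trans h2).trans h3
        rw [hyx] at this
        exact this.cons_inv
      obtain ⟨c, cs, hc⟩ := List.exists_cons_of_ne_nil
        (by intro h; rw [h] at hpoollen; simp at hpoollen : pool ≠ [])
      obtain ⟨hbmem, _, hball⟩ := scan_min (c :: cs) c
      have hbmem' : (c :: cs).foldl (fun b v => if v < b then v else b) c ∈ c :: cs := by
        rcases List.mem_cons.1 hbmem with h | h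
        · rw [h]; exact List.mem_cons_self
        · exact h
      have hbest : (c :: cs).foldl (fun b v => if v < b then v else b) c = w := by
        exact min_unique (hc ▸ hysperm.symm) hball hwmem hbmem' hwmin
      have hB : solutionStepB k (some (ans, pool)) x = some (ans ++ [w], pool) := by
        simp only [solutionStepB, hnlt, if_false, ← hM, hpg, hx, if_false]
        rw [hc, PySem.List.pyGet?_zero_cons]
        simp only [hbest]
      refine ⟨w, ys, pool, hA, hB, hysperm.symm, ?_⟩
      push_cast [hyslen]; omega

lemma fold_rel (k : Int) (hk : 1 ≤ k) : ∀ (score ans a pool : List Int),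
    pool.Perm a → (a.length : Int) ≤ k →
    (score.foldl (solutionStepB k) (some (ans, pool))).map Prod.fst =
      (score.foldl (solutionStepA k) (some (ans, a))).map Prod.fst := by
  intro score
  induction score with
  | nil => intro ans a pool _ _; rfl
  | cons x rest ih =>
    intro ans a pool hperm hlen
    obtain ⟨v, a2, p2, hA, hB, h1, h2⟩ := step_rel k hk ans a pool hperm hlen x
    simp only [List.foldl_cons, hA, hB]
    exact ih (ans ++ [v]) a2 p2 h1 h2

-- ===== VERDICT (by name: the statement is the Claim_ definition above) =====
theorem solution_spec : Claim_equal_solution := by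
  intro k score _ hpre
  unfold Spec_solution
  rcases hpre with hk | hnil
  · unfold solution solution_alt
    rw [fold_rel k hk score [] [] [] (List.Perm.refl []) (by simp; omega)]
  · subst hnil; rfl
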